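-- pv_equiv track=rewrite | github.com/andresgr96/MinionsLLM | tests/syntax/grammar_validator.py | _generate_flattened_shapes_from_combination
-- ===== SOURCE A (Python) =====
-- from typing import List, Dict, Tuple, Any, Optional
-- import itertools
--
-- def _generate_flattened_shapes_from_combination(combination: List[Any]) -> List[List[str]]:
--     all_choice_paths = list(itertools.product(*combination))
--     all_flattened_shapes = []
--     for path in all_choice_paths:
--         flattened_shape = []
--         for choice in path:
--             flattened_shape.extend(choice)
--         if flattened_shape not in all_flattened_shapes:
--             all_flattened_shapes.append(flattened_shape)
--     return all_flattened_shapes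
-- ===== SOURCE B (Python) =====
-- def _generate_flattened_shapes_from_combination(combination):
--     # Recursive on the group list; duplicates are pruned at EVERY level, so the
--     # full cartesian product is never materialized when intermediate shapes repeat.
--     if not combination:
--         return [[]]
--     tails = _generate_flattened_shapes_from_combination(combination[1:])
--     shapes = []
--     for choice in combination[0]:
--         for tail in tails:
--             shape = list(choice) + tail
--             if shape not in shapes:
--                 shapes.append(shape)
--     return shapes
-- ===== Notes on version B (the rewrite author's own statement) =====
-- stated objective: alternative
-- what changed: Replaced materializing the full itertools.product then flattening and deduping by a recursion on the group list that builds flattened shapes level by level and prunes duplicates at every level, so the full product is never materialized when intermediate shapes repeat.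
import Mathlib
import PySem

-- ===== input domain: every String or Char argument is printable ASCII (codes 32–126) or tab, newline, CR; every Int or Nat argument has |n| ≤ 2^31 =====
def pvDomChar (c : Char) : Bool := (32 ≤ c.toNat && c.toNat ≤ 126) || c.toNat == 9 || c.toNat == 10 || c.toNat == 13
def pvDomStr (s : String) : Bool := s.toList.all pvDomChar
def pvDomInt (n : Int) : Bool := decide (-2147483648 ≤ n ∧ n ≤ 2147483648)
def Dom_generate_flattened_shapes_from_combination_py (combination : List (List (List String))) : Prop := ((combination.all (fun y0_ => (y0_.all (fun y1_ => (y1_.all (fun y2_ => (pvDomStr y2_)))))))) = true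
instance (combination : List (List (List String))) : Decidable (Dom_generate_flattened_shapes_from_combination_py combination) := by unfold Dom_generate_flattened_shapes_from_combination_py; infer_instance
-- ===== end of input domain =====

-- B replaces materializing the full itertools.product + flatten + final dedup by a recursion on
-- the group list that builds flattened shapes level by level, pruning duplicates at every level
-- (objective: alternative; never materializes the product when intermediate shapes repeat).

-- ===== PORT A =====
-- itertools.product(*combination): leftmost group varies slowest
def pvProduct (groups : List (List (List String))) : List (List (List String)) :=
  match groups with
  | [] => [[]]
  | g :: rest => g.flatMap (fun c => (pvProduct rest).map (fun p => c :: p))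

def generate_flattened_shapes_from_combination_py (combination : List (List (List String))) : List (List String) :=
  let all_choice_paths := pvProduct combination
  all_choice_paths.foldl (fun all_flattened_shapes path =>
    let flattened_shape := path.foldl (fun s c => s ++ c) []
    if flattened_shape ∈ all_flattened_shapes then all_flattened_shapes
    else all_flattened_shapes ++ [flattened_shape]) []

-- ===== PORT B =====
-- recursion on combination; nested loops append shape unless already present (per-level pruning)
def generate_flattened_shapes_from_combination_py_alt (combination : List (List (List String))) : List (List String) :=
  match combination with
  | [] => [[]]
  | g :: rest =>
    let tails := generate_flattened_shapes_from_combination_py_alt rest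
    g.foldl (fun shapes choice =>
      tails.foldl (fun shapes tail =>
        let shape := choice ++ tail
        if shape ∈ shapes then shapes else shapes ++ [shape]) shapes) []

-- ===== PRECONDITION & SPEC =====
def Spec_generate_flattened_shapes_from_combination_py (combination : List (List (List String))) (out : List (List String)) : Prop := out = generate_flattened_shapes_from_combination_py_alt combination
instance (combination : List (List (List String))) (out : List (List String)) : Decidable (Spec_generate_flattened_shapes_from_combination_py combination out) := by unfold Spec_generate_flattened_shapes_from_combination_py; infer_instance

-- ===== CLAIM (what is proved, stated in full; the proofs are below) =====
def Claim_equal_generate_flattened_shapes_from_combination_py : Prop := ∀ (combination : List (List (List String))), Dom_generate_flattened_shapes_from_combination_py combination → Spec_generate_flattened_shapes_from_combination_py combination (generate_flattened_shapes_from_combination_py combination)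

-- ===== LEMMAS AND PROOFS =====

-- the list of flattened shapes of all product paths, group by group (proof-only normal form)
def pvShapes (groups : List (List (List String))) : List (List String) :=
  match groups with
  | [] => [[]]
  | g :: rest => g.flatMap (fun c => (pvShapes rest).map (fun t => c ++ t))

-- updating with elements already present is a no-op
theorem pv_update_of_subset (l s : List (List String)) (h : ∀ x ∈ l, x ∈ s) :
    PySem.Set.update s l = s := by
  induction l generalizing s with
  | nil => rfl
  | cons x l ih =>
    rw [PySem.Set.update_cons, PySem.Set.add_of_mem (h x (by simp))]
    exact ih s (fun y hy => h y (by simp [hy]))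

-- the membership-guarded append loop is Set.update with the mapped elements
theorem pv_memloop {β : Type} (f : β → List String) (l : List β) (s : List (List String)) :
    l.foldl (fun acc x => if f x ∈ acc then acc else acc ++ [f x]) s
      = PySem.Set.update s (l.map f) := by
  rw [PySem.Set.update_map_eq_foldl_add]
  simp only [PySem.Set.add_eq_ite]

-- folding per-group updates is one update over the flatMap
theorem pv_update_flatMap {β : Type} (h : β → List (List String)) (g : List β) (s : List (List String)) :
    g.foldl (fun s c => PySem.Set.update s (h c)) s = PySem.Set.update s (g.flatMap h) := by
  induction g generalizing s with
  | nil => rfl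
  | cons c g ih =>
    simp only [List.foldl_cons, List.flatMap_cons]
    rw [ih, PySem.Set.update_append]

-- KEY: seen-set pruning of the tail list does not change the final set-as-list
theorem pv_update_map_update (R : List (List String)) (f : List String → List String) :
    ∀ (s u : List (List String)), (∀ x ∈ u, f x ∈ s) →
    PySem.Set.update s ((PySem.Set.update u R).map f) = PySem.Set.update s (R.map f) := by
  induction R with
  | nil =>
    intro s u hu
    exact pv_update_of_subset _ s (by simpa using hu)
  | cons r R ih =>
    intro s u hu
    rw [PySem.Set.update_cons u r, List.map_cons, PySem.Set.update_cons s (f r)]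
    by_cases hru : r ∈ u
    · rw [PySem.Set.add_of_mem hru, PySem.Set.add_of_mem (hu r hru)]
      exact ih s u hu
    · rw [PySem.Set.add_of_not_mem hru]
      by_cases hfs : f r ∈ s
      · have hu' : ∀ x ∈ u ++ [r], f x ∈ s := by
          intro x hx
          rcases List.mem_append.1 hx with h | h
          · exact hu x h
          · simp only [List.mem_singleton] at h
            subst h; exact hfs
        rw [PySem.Set.add_of_mem hfs]
        exact ih s (u ++ [r]) hu'
      · rw [PySem.Set.add_of_not_mem hfs]
        have hs' : ∀ x ∈ u ++ [r], f x ∈ s ++ [f r] := by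
          intro x hx
          rcases List.mem_append.1 hx with h | h
          · exact List.mem_append.2 (Or.inl (hu x h))
          · simp only [List.mem_singleton] at h
            subst h; simp
        have hsubU : ∀ y ∈ u.map f, y ∈ s := by
          intro y hy
          rcases List.mem_map.1 hy with ⟨x, hx, rfl⟩
          exact hu x hx
        have hsubU' : ∀ y ∈ u.map f, y ∈ s ++ [f r] := by
          intro y hy
          exact List.mem_append.2 (Or.inl (hsubU y hy))
        have hih := ih (s ++ [f r]) (u ++ [r]) hs'
        -- decompose the seen-set update: update (u++[r]) R = (u++[r]) ++ v
        rw [PySem.Set.update_eq_append_filter (u ++ [r]) R] at hih ⊢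
        have hmap : (((u ++ [r]) ++ (PySem.Set.ofList R).filter
              (fun y => !(PySem.Set.contains (u ++ [r]) y))).map f)
            = u.map f ++ (f r :: ((PySem.Set.ofList R).filter
              (fun y => !(PySem.Set.contains (u ++ [r]) y))).map f) := by
          simp
        rw [hmap, PySem.Set.update_append] at hih ⊢
        rw [pv_update_of_subset (u.map f) s hsubU]
        rw [pv_update_of_subset (u.map f) (s ++ [f r]) hsubU'] at hih
        rw [PySem.Set.update_cons, PySem.Set.add_of_not_mem hfs]
        rw [PySem.Set.update_cons, PySem.Set.add_of_mem (by simp)] at hih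
        exact hih

-- pvShapes is flatten mapped over the cartesian product
theorem pv_foldl_append (l : List (List String)) (b : List String) :
    l.foldl (fun s c => s ++ c) b = b ++ l.foldl (fun s c => s ++ c) [] := by
  induction l generalizing b with
  | nil => simp
  | cons c l ih =>
    simp only [List.foldl_cons, List.nil_append]
    rw [ih (b ++ c), ih c, List.append_assoc]

theorem pv_shapes_eq_map_flatten (groups : List (List (List String))) :
    pvShapes groups = (pvProduct groups).map (fun p => p.foldl (fun s c => s ++ c) []) := by
  induction groups with
  | nil => rfl
  | cons g rest ih =>
    simp only [pvShapes, pvProduct, ih, List.map_flatMap, List.map_map]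
    congr 1; funext c
    congr 1; funext p
    simp only [Function.comp_apply, List.foldl_cons, List.nil_append]
    rw [pv_foldl_append p c]

-- B computes ofList (pvShapes comb)
theorem pv_alt_eq_update (combination : List (List (List String))) :
    generate_flattened_shapes_from_combination_py_alt combination
      = PySem.Set.update [] (pvShapes combination) := by
  induction combination with
  | nil => rfl
  | cons g rest ih =>
    show (g.foldl (fun shapes choice =>
        (generate_flattened_shapes_from_combination_py_alt rest).foldl
          (fun shapes tail => if choice ++ tail ∈ shapes then shapes else shapes ++ [choice ++ tail])
          shapes) []) = _
    have hinner : ∀ (choice : List String) (shapes : List (List String)),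
        (generate_flattened_shapes_from_combination_py_alt rest).foldl
          (fun shapes tail => if choice ++ tail ∈ shapes then shapes else shapes ++ [choice ++ tail]) shapes
        = PySem.Set.update shapes ((PySem.Set.update [] (pvShapes rest)).map (fun t => choice ++ t)) := by
      intro choice shapes
      rw [← ih]
      exact pv_memloop (fun t => choice ++ t) _ shapes
    calc (g.foldl (fun shapes choice =>
            (generate_flattened_shapes_from_combination_py_alt rest).foldl
              (fun shapes tail => if choice ++ tail ∈ shapes then shapes else shapes ++ [choice ++ tail])
              shapes) [])
        = g.foldl (fun shapes choice =>
            PySem.Set.update shapes ((pvShapes rest).map (fun t => choice ++ t))) [] := by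
          apply PySem.List.foldl_congr_mem
          intro shapes choice _
          rw [hinner choice shapes]
          exact pv_update_map_update (pvShapes rest) (fun t => choice ++ t) shapes [] (by simp)
      _ = PySem.Set.update [] (pvShapes (g :: rest)) := by
          rw [pv_update_flatMap]; rfl

-- ===== VERDICT (by name: the statement is the Claim_ definition above) =====
theorem generate_flattened_shapes_from_combination_py_spec : Claim_equal_generate_flattened_shapes_from_combination_py := by
  intro combination _
  unfold Spec_generate_flattened_shapes_from_combination_py
  unfold generate_flattened_shapes_from_combination_py
  rw [pv_memloop (fun p => p.foldl (fun s c => s ++ c) []) (pvProduct combination) []]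
  rw [pv_alt_eq_update, pv_shapes_eq_map_flatten]
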